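-- pv_equiv track=rewrite | github.com/max-talanov/cc | optimization/core/simulator.py | split_population
-- ===== SOURCE A (Python) =====
-- def split_population(population, n_subgroups):
--     if n_subgroups <= 0:
--         return [population]
--     size = len(population)
--     if size == 0:
--         return [[] for _ in range(n_subgroups)]
--     step = max(1, size // n_subgroups)
--     return [population[i*step:(i+1)*step] for i in range(n_subgroups)]
-- ===== SOURCE B (Python) =====
-- def split_population(population, n_subgroups):
--     if n_subgroups <= 0:
--         return [population]
--     step = max(1, len(population) // n_subgroups)
--     groups = [[] for _ in range(n_subgroups)]
--     for idx, x in enumerate(population):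
--         g = idx // step
--         if g < n_subgroups:
--             groups[g].append(x)
--     return groups
-- ===== Notes on version B (the rewrite author's own statement) =====
-- stated objective: alternative
-- what changed: Replaces the per-group list comprehension of slices with a single pass over enumerate(population) that scatters each element into a pre-allocated bucket idx//step, dropping indices whose bucket would exceed n_subgroups; the separate empty-population guard disappears.
import Mathlib
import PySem

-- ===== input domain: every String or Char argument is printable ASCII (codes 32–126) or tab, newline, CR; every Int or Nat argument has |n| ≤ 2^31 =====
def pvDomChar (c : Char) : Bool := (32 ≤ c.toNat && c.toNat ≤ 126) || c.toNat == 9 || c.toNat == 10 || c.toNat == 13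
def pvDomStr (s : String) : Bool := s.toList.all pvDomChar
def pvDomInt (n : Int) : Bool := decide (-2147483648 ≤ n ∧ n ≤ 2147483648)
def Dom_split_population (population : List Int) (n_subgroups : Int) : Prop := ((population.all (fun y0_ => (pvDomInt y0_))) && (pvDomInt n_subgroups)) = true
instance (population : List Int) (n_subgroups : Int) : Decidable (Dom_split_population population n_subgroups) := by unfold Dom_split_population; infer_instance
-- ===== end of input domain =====

-- B replaces A's per-group slicing comprehension by a single scatter pass over enumerate(population)
-- into pre-allocated buckets (objective: alternative decomposition, same cost).


-- ===== PORT A =====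
def split_population (population : List Int) (n_subgroups : Int) : List (List Int) :=
  if n_subgroups ≤ 0 then [population]
  else
    let size : Int := population.length
    if size = 0 then
      (PySem.List.pyRange 0 n_subgroups 1).map (fun _ => ([] : List Int))
    else
      let step : Int := max 1 (PySem.Int.floordiv size n_subgroups)
      (PySem.List.pyRange 0 n_subgroups 1).map (fun i =>
        PySem.List.slice population (some (i * step)) (some ((i + 1) * step)))

-- ===== PORT B =====
def split_population_alt (population : List Int) (n_subgroups : Int) : List (List Int) :=
  if n_subgroups ≤ 0 then [population]
  else
    let step : Int := max 1 (PySem.Int.floordiv (population.length : Int) n_subgroups)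
    let groups : List (List Int) := (PySem.List.pyRange 0 n_subgroups 1).map (fun _ => ([] : List Int))
    (PySem.List.enumerate population 0).foldl
      (fun groups p =>
        let g : Int := PySem.Int.floordiv p.1 step
        if g < n_subgroups then groups.modify g.toNat (· ++ [p.2]) else groups)
      groups

-- ===== PRECONDITION & SPEC =====
def Spec_split_population (population : List Int) (n_subgroups : Int) (out : List (List Int)) : Prop := out = split_population_alt population n_subgroups
instance (population : List Int) (n_subgroups : Int) (out : List (List Int)) : Decidable (Spec_split_population population n_subgroups out) := by unfold Spec_split_population; infer_instance

-- ===== CLAIM (what is proved, stated in full; the proofs are below) =====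
def Claim_equal_split_population : Prop := ∀ (population : List Int) (n_subgroups : Int), Dom_split_population population n_subgroups → Spec_split_population population n_subgroups (split_population population n_subgroups)

-- ===== LEMMAS AND PROOFS =====

-- the elements the scatter pass sends to bucket i, processing xs with running index k
def pvChunk (s n : Nat) : List Int → Nat → Nat → List Int
  | [], _, _ => []
  | x :: r, k, i => (if k / s = i ∧ i < n then [x] else []) ++ pvChunk s n r (k + 1) i

lemma pvScatter_get (s n : Nat) (xs : List Int) :
    ∀ (k : Nat) (G : List (List Int)) (i : Nat),
      ((PySem.List.enumerate xs (k : Int)).foldl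
        (fun groups (p : Int × Int) =>
          if PySem.Int.floordiv p.1 (s : Int) < (n : Int) then
            groups.modify (PySem.Int.floordiv p.1 (s : Int)).toNat (· ++ [p.2])
          else groups) G)[i]?
      = G[i]?.map (fun l => l ++ pvChunk s n xs k i) := by
  induction xs with
  | nil =>
    intro k G i
    cases hGi : G[i]? <;> simp [PySem.List.enumerate_nil, pvChunk, hGi]
  | cons x r ih =>
    intro k G i
    rw [PySem.List.enumerate_cons]
    simp only [List.foldl_cons]
    have hcast : ((k : Int) + 1) = ((k + 1 : Nat) : Int) := by push_cast; ring
    rw [hcast]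
    have hfd : PySem.Int.floordiv ((k : Nat) : Int) ((s : Nat) : Int) = ((k / s : Nat) : Int) :=
      PySem.Int.floordiv_natCast k s
    by_cases hlt : (k / s : Nat) < n
    · have hc : PySem.Int.floordiv ((k : Nat) : Int) ((s : Nat) : Int) < (n : Int) := by
        rw [hfd]; exact_mod_cast hlt
      simp only [hfd, Int.toNat_natCast]
      rw [if_pos (show ((k / s : Nat) : Int) < (n : Int) from by exact_mod_cast hlt)]
      rw [ih (k + 1) _ i]
      rw [List.getElem?_modify]
      by_cases hik : k / s = i
      · subst hik
        cases hGi : G[k / s]? <;>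
          simp [pvChunk, hlt, List.append_assoc]
      · cases hGi : G[i]? <;>
          simp [pvChunk, hik]
    · have hc : ¬ PySem.Int.floordiv ((k : Nat) : Int) ((s : Nat) : Int) < (n : Int) := by
        rw [hfd]; exact_mod_cast hlt
      simp only [hfd, Int.toNat_natCast]
      rw [if_neg (show ¬ ((k / s : Nat) : Int) < (n : Int) from by exact_mod_cast hlt)]
      rw [ih (k + 1) _ i]
      have hg : ¬ (k / s = i ∧ i < n) := by rintro ⟨rfl, h⟩; exact hlt h
      cases hGi : G[i]? <;> simp [pvChunk, hg]

lemma pvChunk_eq (s n : Nat) (hs : 0 < s) (i : Nat) (hin : i < n) :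
    ∀ (xs : List Int) (k : Nat),
      pvChunk s n xs k i = (xs.take (s * (i + 1) - k)).drop (s * i - k) := by
  intro xs
  induction xs with
  | nil => intro k; simp [pvChunk]
  | cons x r ih =>
    intro k
    have hdm := Nat.div_add_mod k s
    have hsi : s * (i + 1) = s * i + s := by ring
    have hms := Nat.mod_lt k hs
    rcases Nat.lt_or_ge k (s * i) with h1 | h1
    · -- before bucket i
      have hg : ¬ (k / s = i ∧ i < n) := by
        rintro ⟨rfl, _⟩; omega
      obtain ⟨a, ha⟩ : ∃ a, s * i - k = a + 1 := ⟨s * i - k - 1, by omega⟩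
      obtain ⟨b, hb⟩ : ∃ b, s * (i + 1) - k = b + 1 := ⟨s * (i + 1) - k - 1, by omega⟩
      have ha' : s * i - (k + 1) = a := by omega
      have hb' : s * (i + 1) - (k + 1) = b := by omega
      simp only [pvChunk, hg, if_false, List.nil_append, ih (k + 1), ha', hb',
        ha, hb, List.take_succ_cons, List.drop_succ_cons]
    · rcases Nat.lt_or_ge k (s * (i + 1)) with h2 | h2
      · -- inside bucket i
        have hg : k / s = i ∧ i < n := by
          refine ⟨Nat.div_eq_of_lt_le ?_ ?_, hin⟩
          · rw [Nat.mul_comm]; exact h1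
          · rw [Nat.mul_comm]; exact h2
        obtain ⟨b, hb⟩ : ∃ b, s * (i + 1) - k = b + 1 := ⟨s * (i + 1) - k - 1, by omega⟩
        have ha : s * i - k = 0 := by omega
        have ha' : s * i - (k + 1) = 0 := by omega
        have hb' : s * (i + 1) - (k + 1) = b := by omega
        simp only [pvChunk, ih (k + 1), ha', hb', ha, hb,
          List.take_succ_cons, List.drop_zero]
        rw [if_pos hg]
        simp
      · -- after bucket i
        have hg : ¬ (k / s = i ∧ i < n) := by
          rintro ⟨rfl, _⟩; omega
        have ha : s * (i + 1) - k = 0 := by omega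
        have ha' : s * (i + 1) - (k + 1) = 0 := by omega
        simp only [pvChunk, hg, if_false, List.nil_append, ih (k + 1), ha, ha',
          List.take_zero, List.drop_nil]

-- ===== VERDICT (by name: the statement is the Claim_ definition above) =====
theorem split_population_spec : Claim_equal_split_population := by
  intro population n_subgroups _
  unfold Spec_split_population split_population split_population_alt
  by_cases hneg : n_subgroups ≤ 0
  · simp [hneg]
  · simp only [hneg, if_false]
    rw [not_le] at hneg
    obtain ⟨n, rfl⟩ : ∃ n : Nat, n_subgroups = (n : Int) := ⟨n_subgroups.toNat, by omega⟩
    have hn : 0 < n := by exact_mod_cast hneg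
    set L := population.length with hL
    -- the common step, as a natural number
    set s : Nat := max 1 (L / n) with hsdef
    have hs : 0 < s := by omega
    have hstep : max 1 (PySem.Int.floordiv (L : Int) (n : Int)) = (s : Int) := by
      rw [PySem.Int.floordiv_natCast]
      simp [hsdef, Nat.cast_max]
    by_cases hL0 : population = []
    · subst hL0
      simp [PySem.List.enumerate_nil]
    · have hsz : ¬ ((L : Int) = 0) := by
        have h0 : population.length ≠ 0 := by simpa using hL0
        simp only [hL]; exact_mod_cast h0
      simp only [hL] at hsz ⊢
      simp only [hsz, if_false]
      rw [show (population.length : Int) = (L : Int) from by rw [hL]] at *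
      rw [hstep]
      apply List.ext_getElem?
      intro i
      rw [show PySem.List.enumerate population = PySem.List.enumerate population ((0 : Nat) : Int) from by norm_num]
      rw [pvScatter_get s n population 0]
      by_cases hi : i < n
      · rw [PySem.List.getElem?_map_pyRange_zero _ n i hi,
            PySem.List.getElem?_map_pyRange_zero _ n i hi]
        simp only [Option.map_some, List.nil_append]
        rw [pvChunk_eq s n hs i hi population 0]
        have harg1 : ((i : Int) * (s : Int)) = (((i * s : Nat) : Int)) := by push_cast; ring
        have harg2 : (((i : Int) + 1) * (s : Int)) = ((((i + 1) * s : Nat) : Int)) := by push_cast; ring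
        have e1 : (i + 1) * s - i * s = s := by rw [Nat.succ_mul]; omega
        have e2 : s * (i + 1) - s * i = s := by rw [Nat.mul_succ]; omega
        rw [harg1, harg2, PySem.List.slice_natCast, e1, Nat.sub_zero, Nat.sub_zero,
          List.drop_take, e2, Nat.mul_comm s i]
      · have hlen1 : ((PySem.List.pyRange 0 (n : Int) 1).map
            (fun i => PySem.List.slice population (some (i * (s : Int))) (some ((i + 1) * (s : Int))))).length = n := by
          simp [PySem.List.length_pyRange_one]
        have hlen2 : ((PySem.List.pyRange 0 (n : Int) 1).map (fun _ => ([] : List Int))).length = n := by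
          simp [PySem.List.length_pyRange_one]
        rw [List.getElem?_eq_none (by omega), List.getElem?_eq_none (by omega)]
        simp
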